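-- pv_equiv track=rewrite | github.com/Fernando-Houston/Core-Agent-Architecture | T3_Agent_Population_Engine/enrich_cross_domain.py | extract_geo_insights
-- ===== SOURCE A (Python) =====
-- from collections import defaultdict
-- from typing import Dict, List, Any
--
-- def extract_geo_insights(location: str, entries: List[Dict]) -> List[str]:
--     """Extract insights for a geographic area"""
--     insights = []
--
--     # Count agent perspectives
--     agent_counts = defaultdict(int)
--     for entry in entries:
--         agent_counts[entry['agent']] += 1
--
--     insights.append(f"{len(agent_counts)} different intelligence domains active in {location}")
--
--     # Look for specific patterns
--     has_market = any('Market' in e['agent'] for e in entries)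
--     has_env = any('Environmental' in e['agent'] for e in entries)
--     has_tech = any('Technology' in e['agent'] for e in entries)
--
--     if has_market and has_tech:
--         insights.append(f"{location} shows tech-driven market growth potential")
--     if has_env and has_market:
--         insights.append(f"Environmental factors may impact {location} development")
--
--     return insights
-- ===== SOURCE B (Python) =====
-- def extract_geo_insights(location, entries):
--     """Sort the agent names once; count domains by scanning the sorted list for
--     adjacent changes, and answer the pattern queries against that sorted list."""
--     names = sorted(e['agent'] for e in entries)
--     domains = 0
--     prev = None
--     for n in names:
--         if prev != n:
--             domains += 1
--         prev = n
--
--     def has(pattern):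
--         return any(pattern in n for n in names)
--
--     insights = [f"{domains} different intelligence domains active in {location}"]
--     if has('Market') and has('Technology'):
--         insights.append(f"{location} shows tech-driven market growth potential")
--     if has('Environmental') and has('Market'):
--         insights.append(f"Environmental factors may impact {location} development")
--     return insights
-- ===== Notes on version B (the rewrite author's own statement) =====
-- stated objective: alternative
-- what changed: B sorts the agent names once and then counts distinct domains by a single adjacent-change scan of the sorted list (instead of A's defaultdict counting loop), and evaluates the three pattern flags as queries against that sorted name list.
import Mathlib
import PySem

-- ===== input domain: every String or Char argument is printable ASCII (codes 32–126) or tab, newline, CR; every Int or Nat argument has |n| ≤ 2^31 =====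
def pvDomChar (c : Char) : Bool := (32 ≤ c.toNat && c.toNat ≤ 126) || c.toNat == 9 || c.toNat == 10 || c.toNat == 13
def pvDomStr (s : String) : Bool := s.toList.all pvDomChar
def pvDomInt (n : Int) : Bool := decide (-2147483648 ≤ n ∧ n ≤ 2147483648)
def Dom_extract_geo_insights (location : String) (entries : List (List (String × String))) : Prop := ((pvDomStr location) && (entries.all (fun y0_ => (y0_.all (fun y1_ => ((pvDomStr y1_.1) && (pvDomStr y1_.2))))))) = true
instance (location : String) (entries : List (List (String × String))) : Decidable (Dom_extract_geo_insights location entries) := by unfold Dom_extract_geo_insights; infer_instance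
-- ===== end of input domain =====

-- B sorts the agent names once and reads everything off the sorted list:
-- an adjacent-change scan counts the distinct domains (replacing A's count dict)
-- and the pattern flags are queried against the sorted names (objective: alternative).

-- ===== PORT A =====
-- entry['agent']; Pre_ guarantees the key is present (Python raises KeyError otherwise)
def pvAgent (e : List (String × String)) : String :=
  ((PySem.Dict.mk e).get? "agent").getD ""

def extract_geo_insights (location : String) (entries : List (List (String × String))) : List String :=
  let agent_counts : PySem.Dict String Int :=
    entries.foldl (fun d e => d.modify (pvAgent e) 0 (· + 1)) PySem.Dict.empty
  let insights : List String :=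
    [PySem.Int.toStr (agent_counts.size : Int) ++ " different intelligence domains active in " ++ location]
  let has_market := entries.any (fun e => PySem.Str.isIn "Market" (pvAgent e))
  let has_env := entries.any (fun e => PySem.Str.isIn "Environmental" (pvAgent e))
  let has_tech := entries.any (fun e => PySem.Str.isIn "Technology" (pvAgent e))
  let insights := if has_market && has_tech then
      insights ++ [location ++ " shows tech-driven market growth potential"] else insights
  let insights := if has_env && has_market then
      insights ++ ["Environmental factors may impact " ++ location ++ " development"] else insights
  insights

-- ===== PORT B =====
-- one step of B's adjacent-change scan over the sorted names
def pvCountStep (st : Int × Option String) (n : String) : Int × Option String :=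
  (if st.2 = some n then st.1 else st.1 + 1, some n)

-- B's helper 'has(pattern)'
def pvHas (names : List String) (pattern : String) : Bool :=
  names.any (fun n => PySem.Str.isIn pattern n)

def extract_geo_insights_alt (location : String) (entries : List (List (String × String))) : List String :=
  let names := PySem.List.sorted (entries.map pvAgent) (fun x => x) false
  let domains := (names.foldl pvCountStep ((0 : Int), (none : Option String))).1
  let insights : List String :=
    [PySem.Int.toStr domains ++ " different intelligence domains active in " ++ location]
  let insights := if pvHas names "Market" && pvHas names "Technology" then
      insights ++ [location ++ " shows tech-driven market growth potential"] else insights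
  if pvHas names "Environmental" && pvHas names "Market" then
      insights ++ ["Environmental factors may impact " ++ location ++ " development"] else insights

-- ===== PRECONDITION & SPEC =====
-- Pre_ excludes entries without an 'agent' key, where A (and B) raise KeyError.
def Pre_extract_geo_insights (location : String) (entries : List (List (String × String))) : Prop :=
  entries.all (fun e => (PySem.Dict.mk e).contains "agent") = true
instance (location : String) (entries : List (List (String × String))) : Decidable (Pre_extract_geo_insights location entries) := by unfold Pre_extract_geo_insights; infer_instance

def pvWitness_extract_geo_insights : String × (List (List (String × String))) :=
  ("Houston", [[("agent", "Market Intel")], [("agent", "Technology")]])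

def Spec_extract_geo_insights (location : String) (entries : List (List (String × String))) (out : List String) : Prop := out = extract_geo_insights_alt location entries
instance (location : String) (entries : List (List (String × String))) (out : List String) : Decidable (Spec_extract_geo_insights location entries out) := by unfold Spec_extract_geo_insights; infer_instance

-- ===== CLAIM =====
def Claim_equal_extract_geo_insights : Prop := ∀ (location : String) (entries : List (List (String × String))), Dom_extract_geo_insights location entries → Pre_extract_geo_insights location entries → Spec_extract_geo_insights location entries (extract_geo_insights location entries)

-- ===== LEMMAS AND PROOFS =====

lemma pvCardInsertErase (t : Finset String) (x : String) :
    (insert x t).card = (t.erase x).card + 1 := by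
  by_cases h : x ∈ t
  · rw [Finset.card_insert_of_mem h, Finset.card_erase_of_mem h]
    have : 1 ≤ t.card := Finset.card_pos.mpr ⟨x, h⟩
    omega
  · rw [Finset.card_insert_of_notMem h, Finset.erase_eq_of_notMem h]

-- B's scan after a previous element p that bounds the rest of a sorted list:
-- it adds one per distinct element other than p.
lemma pvCountStep_foldl_some (s : List String) (hs : s.Pairwise (· ≤ ·)) :
    ∀ (d : Int) (p : String), (∀ x ∈ s, p ≤ x) →
      (s.foldl pvCountStep (d, some p)).1 = d + ((s.toFinset.erase p).card : Int) := by
  induction s with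
  | nil => intro d p _; simp
  | cons x xs ih =>
      intro d p hp
      have hx : ∀ y ∈ xs, x ≤ y := by
        intro y hy; exact (List.pairwise_cons.mp hs).1 y hy
      have ih' := ih (List.pairwise_cons.mp hs).2
      by_cases hxp : p = x
      · subst hxp
        have hstep : pvCountStep (d, some p) p = (d, some p) := by simp [pvCountStep]
        simp only [List.foldl_cons, hstep]
        rw [ih' d p hx]
        congr 2
        rw [List.toFinset_cons, Finset.erase_insert_eq_erase]
      · have hpx : p < x := lt_of_le_of_ne (hp x (List.mem_cons_self)) hxp
        have hstep : pvCountStep (d, some p) x = (d + 1, some x) := by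
          simp [pvCountStep]; exact hxp
        simp only [List.foldl_cons, hstep]
        rw [ih' (d + 1) x hx]
        have hpnot : p ∉ (x :: xs) := by
          intro hmem
          rcases List.mem_cons.mp hmem with h | h
          · exact hxp h
          · exact absurd (hx p h) (not_le.mpr hpx)
        have h1 : (x :: xs).toFinset.erase p = (x :: xs).toFinset := by
          apply Finset.erase_eq_of_notMem
          simpa using hpnot
        have h2 : (x :: xs).toFinset = insert x xs.toFinset := by simp
        rw [h1, h2, pvCardInsertErase]
        push_cast
        ring

-- B's full scan of a sorted list counts the distinct elements.
lemma pvCountStep_foldl (s : List String) (hs : s.Pairwise (· ≤ ·)) :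
    (s.foldl pvCountStep ((0 : Int), (none : Option String))).1 = (s.toFinset.card : Int) := by
  cases s with
  | nil => simp
  | cons x xs =>
      have hx : ∀ y ∈ xs, x ≤ y := by
        intro y hy; exact (List.pairwise_cons.mp hs).1 y hy
      have hstep : pvCountStep ((0 : Int), (none : Option String)) x = (1, some x) := by
        simp [pvCountStep]
      simp only [List.foldl_cons, hstep]
      rw [pvCountStep_foldl_some xs (List.pairwise_cons.mp hs).2 1 x hx]
      have h2 : (x :: xs).toFinset = insert x xs.toFinset := by simp
      rw [h2, pvCardInsertErase]
      push_cast
      ring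

-- A's dict of counts has the distinct agent names as keys; its size is the
-- cardinality of the set of names.
lemma size_counts (l : List (List (String × String))) :
    (l.foldl (fun d e => d.modify (pvAgent e) 0 (· + 1)) (PySem.Dict.empty : PySem.Dict String Int)).size =
      (l.map pvAgent).toFinset.card := by
  have h := PySem.Dict.keys_foldl_modify_key l pvAgent 0
      (fun _ _ => (· + 1)) (PySem.Dict.empty (κ := String) (ν := Int))
  have h' := congrArg List.length h
  have hset : PySem.Set.update (PySem.Dict.empty (κ := String) (ν := Int)).keys (l.map pvAgent)
      = PySem.List.dedup (l.map pvAgent) := by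
    simp [PySem.Dict.keys, PySem.Dict.empty, PySem.List.dedup_eq_ofList, PySem.Set.ofList,
      PySem.Set.update, PySem.Set.empty]
  rw [hset] at h'
  have hnodup : (PySem.List.dedup (l.map pvAgent)).Nodup := PySem.List.nodup_dedup _
  have hfin : (PySem.List.dedup (l.map pvAgent)).toFinset = (l.map pvAgent).toFinset := by
    apply Finset.ext; intro a
    simp
  have hlen : (PySem.List.dedup (l.map pvAgent)).length = (l.map pvAgent).toFinset.card := by
    rw [← hfin]
    exact (List.toFinset_card_of_nodup hnodup).symm
  rw [← hlen]
  simpa [PySem.Dict.size, PySem.Dict.keys] using h'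

theorem extract_geo_insights_eq (location : String) (entries : List (List (String × String))) :
    extract_geo_insights location entries = extract_geo_insights_alt location entries := by
  unfold extract_geo_insights extract_geo_insights_alt
  have hperm : (PySem.List.sorted (entries.map pvAgent) (fun x => x) false).Perm (entries.map pvAgent) :=
    PySem.List.sorted_perm _ _ _
  have hpair : (PySem.List.sorted (entries.map pvAgent) (fun x => x) false).Pairwise (· ≤ ·) := by
    simpa using PySem.List.sorted_pairwise (entries.map pvAgent) (fun x => x)
  have hcount : ((PySem.List.sorted (entries.map pvAgent) (fun x => x) false).foldl pvCountStep
      ((0 : Int), (none : Option String))).1 = ((entries.map pvAgent).toFinset.card : Int) := by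
    rw [pvCountStep_foldl _ hpair, List.toFinset_eq_of_perm _ _ hperm]
  have hany : ∀ pat : String, pvHas (PySem.List.sorted (entries.map pvAgent) (fun x => x) false) pat
      = entries.any (fun e => PySem.Str.isIn pat (pvAgent e)) := by
    intro pat
    unfold pvHas
    rw [hperm.any_eq, List.any_map]
    rfl
  simp only [size_counts, hcount, hany]

-- ===== VERDICT =====
theorem extract_geo_insights_spec : Claim_equal_extract_geo_insights := by
  intro location entries _ _
  unfold Spec_extract_geo_insights
  exact extract_geo_insights_eq location entries
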